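-- pv_equiv track=rewrite | github.com/129lovely/dodamdodam-flask | get_pdf.py | keyword_dic
-- ===== SOURCE A (Python) =====
-- def keyword_dic(keyword, text):
--     dic = {}
--     for k_word in keyword[0]:
--         dic[k_word]=[]
--     for k_word in keyword[0]:
--         for sentence in text:
--             if k_word in sentence:
--                 dic[k_word].append(sentence)
--     return dic
-- ===== SOURCE B (Python) =====
-- def keyword_dic(keyword, text):
--     keys = keyword[0]
--     # windowed inverted index: for each keyword length L, slide an L-window over each
--     # sentence collecting its substrings of that length, index substring -> sentences,
--     # then answer every keyword by a single lookup.
--     lengths = sorted({len(k) for k in keys})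
--     index = {}
--     for sentence in text:
--         n = len(sentence)
--         seen = set()
--         for L in lengths:
--             for i in range(n - L + 1):
--                 seen.add(sentence[i:i + L])
--         for sub in seen:
--             index.setdefault(sub, []).append(sentence)
--     return {k: index.get(k, []) for k in keys}
-- ===== Notes on version B (the rewrite author's own statement) =====
-- stated objective: alternative
-- what changed: B never searches for a keyword inside a sentence: it collects the distinct keyword lengths, slides a window of each such length over every sentence to build an inverted index mapping substrings to the sentences containing them, and then answers each keyword by one dictionary lookup, instead of A's per-keyword substring scan of the whole text.
-- outside the precondition, e.g. on keyword_dic([], ['x']): A raises IndexError, B raises IndexError; on keyword_dic([['a', 'a']], ['ab']): A returns {'a': ['ab', 'ab']}, B returns {'a': ['ab']}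
import Mathlib
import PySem

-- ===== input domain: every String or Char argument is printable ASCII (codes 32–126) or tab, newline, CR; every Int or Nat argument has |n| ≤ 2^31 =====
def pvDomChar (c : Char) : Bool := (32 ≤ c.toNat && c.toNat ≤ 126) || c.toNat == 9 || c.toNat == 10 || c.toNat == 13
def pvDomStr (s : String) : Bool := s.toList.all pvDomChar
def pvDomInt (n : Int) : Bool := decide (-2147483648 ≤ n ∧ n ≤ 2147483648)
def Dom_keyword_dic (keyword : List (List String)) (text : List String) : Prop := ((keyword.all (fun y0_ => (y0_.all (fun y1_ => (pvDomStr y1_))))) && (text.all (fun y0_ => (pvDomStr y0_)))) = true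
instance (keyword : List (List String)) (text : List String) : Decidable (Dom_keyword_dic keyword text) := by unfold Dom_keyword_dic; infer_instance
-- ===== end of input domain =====

-- B replaces A's per-keyword substring scans of every sentence by a windowed inverted index:
-- it slides a window of each distinct keyword length over each sentence, maps every windowed
-- substring to the sentences containing it, and answers each keyword by one dictionary lookup.

-- ===== PORT A =====
def keyword_dic (keyword : List (List String)) (text : List String) : List (String × List String) :=
  match keyword with
  | [] => []  -- Python raises IndexError on keyword[0] here; excluded by Pre_
  | ks :: _ =>
    let dic : PySem.Dict String (List String) :=
      ks.foldl (fun d k => d.insert k ([] : List String)) PySem.Dict.empty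
    let dic :=
      ks.foldl (fun d k =>
        text.foldl (fun d s =>
          if PySem.Str.isIn k s then d.modify k [] (fun l => l ++ [s]) else d) d) dic
    dic.items

-- ===== PORT B =====
-- the per-sentence 'seen' set: all windowed substrings of s whose length is in 'lengths'
def bSeen (lengths : List Int) (s : String) : PySem.Set String :=
  lengths.foldl (fun seen L =>
    (PySem.List.pyRange 0 (PySem.Str.len s - L + 1) 1).foldl
      (fun seen i => PySem.Set.add seen (PySem.Str.slice s (some i) (some (i + L)))) seen)
    PySem.Set.empty

def keyword_dic_alt (keyword : List (List String)) (text : List String) : List (String × List String) :=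
  match keyword with
  | [] => []  -- keyword[0] raises in B too; excluded by Pre_
  | ks :: _ =>
    let lengths := PySem.List.sorted (PySem.Set.ofList (ks.map PySem.Str.len)) (fun x => x) false
    let index : PySem.Dict String (List String) :=
      text.foldl (fun idx s =>
        (bSeen lengths s).foldl (fun idx sub => idx.modify sub [] (fun l => l ++ [s])) idx)
        PySem.Dict.empty
    (ks.foldl (fun d k => d.insert k (index.getD k [])) PySem.Dict.empty).items

-- ===== PRECONDITION & SPEC =====
-- Pre_ excludes keyword = [] (A raises IndexError there) and duplicated strings in keyword[0],
-- a duplicate-dict-keys corner where A appends each matching sentence once per duplicate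
-- occurrence while B lists it once per key — both values are defensible.
def Pre_keyword_dic (keyword : List (List String)) (text : List String) : Prop :=
  keyword ≠ [] ∧ keyword.headI.Nodup
instance (keyword : List (List String)) (text : List String) : Decidable (Pre_keyword_dic keyword text) := by unfold Pre_keyword_dic; infer_instance
def pvWitness_keyword_dic : List (List String) × List String := ([["a", "b"]], ["a cat", "no"])
def Spec_keyword_dic (keyword : List (List String)) (text : List String) (out : List (String × List String)) : Prop := out = keyword_dic_alt keyword text
instance (keyword : List (List String)) (text : List String) (out : List (String × List String)) : Decidable (Spec_keyword_dic keyword text out) := by unfold Spec_keyword_dic; infer_instance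

-- ===== CLAIM (what is proved, stated in full; the proofs are below) =====
def Claim_equal_keyword_dic : Prop := ∀ (keyword : List (List String)) (text : List String), Dom_keyword_dic keyword text → Pre_keyword_dic keyword text → Spec_keyword_dic keyword text (keyword_dic keyword text)

-- ===== LEMMAS AND PROOFS =====

-- ---------- A side: the canonical dict shape A's loops preserve ----------
def mkd (ks : List String) (F : String → List String) : PySem.Dict String (List String) :=
  PySem.Dict.mk (ks.map (fun k => (k, F k)))

theorem mkd_congr (ks : List String) (F G : String → List String)
    (h : ∀ k ∈ ks, F k = G k) : mkd ks F = mkd ks G := by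
  unfold mkd
  exact congrArg PySem.Dict.mk (List.map_congr_left (fun k hk => by rw [h k hk]))

theorem keys_mkd (ks : List String) (F : String → List String) :
    (mkd ks F).keys = ks := by
  unfold mkd
  simp [PySem.Dict.keys_mk, Function.comp_def]

theorem contains_mkd (ks : List String) (F : String → List String) (k0 : String)
    (h : k0 ∈ ks) : (mkd ks F).contains k0 = true := by
  rw [PySem.Dict.contains_iff_mem_keys, keys_mkd]
  exact h

theorem getD_mkd (ks : List String) (F : String → List String) (k0 : String)
    (hnd : ks.Nodup) (h : k0 ∈ ks) : (mkd ks F).getD k0 [] = F k0 := by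
  have hget : (mkd ks F).get? k0 = some (F k0) := by
    apply PySem.Dict.get?_of_mem_items
    · unfold mkd
      exact List.mem_map.mpr ⟨k0, h, rfl⟩
    · rw [keys_mkd]; exact hnd
  rw [PySem.Dict.getD_eq_get?_getD, hget]
  rfl

theorem modify_mkd (ks : List String) (F : String → List String) (k0 : String)
    (g : List String → List String) (hnd : ks.Nodup) (h : k0 ∈ ks) :
    (mkd ks F).modify k0 [] g = mkd ks (fun k => if k = k0 then g (F k0) else F k) := by
  rw [PySem.Dict.modify, getD_mkd ks F k0 hnd h, PySem.Dict.insert,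
      if_pos (contains_mkd ks F k0 h)]
  unfold mkd
  congr 1
  rw [List.map_map]
  apply List.map_congr_left
  intro k hk
  by_cases hkk : k = k0 <;> simp [hkk]

-- A's inner loop over the text, for one keyword k0
theorem textFold_mkd (ks : List String) (k0 : String) (hnd : ks.Nodup) (h : k0 ∈ ks)
    (text : List String) (F : String → List String) :
    text.foldl (fun d s => if PySem.Str.isIn k0 s then d.modify k0 [] (fun l => l ++ [s]) else d) (mkd ks F)
      = mkd ks (fun k => if k = k0 then F k0 ++ text.filter (fun s => PySem.Str.isIn k0 s) else F k) := by
  induction text generalizing F with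
  | nil =>
    simp only [List.foldl_nil, List.filter_nil, List.append_nil]
    apply mkd_congr
    intro k hk
    by_cases hkk : k = k0 <;> simp [hkk]
  | cons s text ih =>
    simp only [List.foldl_cons, List.filter_cons]
    by_cases hc : PySem.Str.isIn k0 s
    · rw [if_pos hc, if_pos hc, modify_mkd ks F k0 _ hnd h, ih]
      apply mkd_congr
      intro k hk
      by_cases hkk : k = k0 <;> simp [hkk]
    · rw [if_neg hc, if_neg (by simpa using hc), ih]

-- A's outer loop over a sublist l of the keywords
theorem A_outer (ks : List String) (hnd : ks.Nodup) (text : List String)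
    (l : List String) (hl : ∀ k ∈ l, k ∈ ks) (hlnd : l.Nodup) (F : String → List String) :
    l.foldl (fun d k =>
        text.foldl (fun d s => if PySem.Str.isIn k s then d.modify k [] (fun l => l ++ [s]) else d) d) (mkd ks F)
      = mkd ks (fun k => if k ∈ l then F k ++ text.filter (fun s => PySem.Str.isIn k s) else F k) := by
  induction l generalizing F with
  | nil =>
    simp only [List.foldl_nil, List.not_mem_nil]
    apply mkd_congr; intro k hk; simp
  | cons k0 l ih =>
    have hk0 : k0 ∈ ks := hl k0 List.mem_cons_self
    have hnotin : k0 ∉ l := (List.nodup_cons.mp hlnd).1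
    simp only [List.foldl_cons]
    rw [textFold_mkd ks k0 hnd hk0 text F,
        ih (fun k hk => hl k (List.mem_cons_of_mem _ hk)) (List.nodup_cons.mp hlnd).2]
    apply mkd_congr
    intro k hk
    by_cases hkl : k ∈ l
    · have hne : k ≠ k0 := fun hh => hnotin (hh ▸ hkl)
      simp [hkl, hne, List.mem_cons]
    · by_cases hkk : k = k0
      · subst hkk
        simp [hkl, List.mem_cons]
      · simp [hkl, hkk, List.mem_cons]

theorem init_mkd (ks : List String) (hnd : ks.Nodup) :
    ks.foldl (fun d k => d.insert k ([] : List String)) PySem.Dict.empty = mkd ks (fun _ => []) := by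
  have h := PySem.Dict.items_foldl_insert_fresh (l := ks) (k := fun a => a)
      (v := fun _ => ([] : List String)) (d := (PySem.Dict.empty : PySem.Dict String (List String)))
      (by intro a _; exact PySem.Dict.contains_empty a)
      (by simpa using hnd)
  unfold mkd
  cases hfold : ks.foldl (fun d k => d.insert k ([] : List String)) PySem.Dict.empty with
  | mk items =>
    congr 1
    have := hfold ▸ h
    simpa [PySem.Dict.empty] using this

-- ---------- B side ----------

-- membership in the nested seen-building fold
theorem mem_bSeen_fold (lengths : List Int) (s : String) (se : PySem.Set String) (x : String) :
    x ∈ lengths.foldl (fun seen L =>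
        (PySem.List.pyRange 0 (PySem.Str.len s - L + 1) 1).foldl
          (fun seen i => PySem.Set.add seen (PySem.Str.slice s (some i) (some (i + L)))) seen) se
      ↔ x ∈ se ∨ ∃ L ∈ lengths, ∃ i, 0 ≤ i ∧ i < PySem.Str.len s - L + 1 ∧
          PySem.Str.slice s (some i) (some (i + L)) = x := by
  induction lengths generalizing se with
  | nil => simp
  | cons L ls ih =>
    simp only [List.foldl_cons]
    rw [ih]
    rw [PySem.Set.mem_foldl_add]
    constructor
    · rintro (⟨hx | ⟨i, hi, hx⟩⟩ | ⟨L', hL', i, h0, h1, hx⟩)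
      · exact Or.inl hx
      · rw [PySem.List.mem_pyRange_one] at hi
        exact Or.inr ⟨L, List.mem_cons_self, i, hi.1, hi.2, hx.symm⟩
      · exact Or.inr ⟨L', List.mem_cons_of_mem _ hL', i, h0, h1, hx⟩
    · rintro (hx | ⟨L', hL', i, h0, h1, hx⟩)
      · exact Or.inl (Or.inl hx)
      · rcases List.mem_cons.mp hL' with hL' | hL'
        · subst hL'
          exact Or.inl (Or.inr ⟨i, PySem.List.mem_pyRange_one.mpr ⟨h0, h1⟩, hx.symm⟩)
        · exact Or.inr ⟨L', hL', i, h0, h1, hx⟩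

theorem nodup_foldl_add (l : List Int) (f : Int → String) (se : PySem.Set String)
    (h : se.Nodup) : (l.foldl (fun se i => PySem.Set.add se (f i)) se).Nodup := by
  induction l generalizing se with
  | nil => exact h
  | cons i l ih =>
    simp only [List.foldl_cons]
    apply ih
    exact PySem.Set.nodup_add se (f i) h

theorem nodup_bSeen (lengths : List Int) (s : String) : (bSeen lengths s).Nodup := by
  unfold bSeen
  generalize hse : (PySem.Set.empty : PySem.Set String) = se
  have h : se.Nodup := by rw [← hse]; exact List.nodup_nil
  clear hse
  induction lengths generalizing se with
  | nil => exact h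
  | cons L ls ih =>
    simp only [List.foldl_cons]
    exact ih _ (nodup_foldl_add _ _ _ h)

-- a windowed slice of s is a substring; a keyword whose length is listed is windowed iff it occurs
theorem mem_bSeen_iff_isIn (lengths : List Int) (hpos : ∀ L ∈ lengths, 0 ≤ L)
    (s k : String) (hk : PySem.Str.len k ∈ lengths) :
    k ∈ bSeen lengths s ↔ PySem.Str.isIn k s = true := by
  unfold bSeen
  rw [mem_bSeen_fold]
  simp only [PySem.Set.empty, List.not_mem_nil, false_or]
  rw [PySem.Str.isIn_iff_infix]
  constructor
  · rintro ⟨L, hL, i, h0, h1, hx⟩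
    have hL0 : 0 ≤ L := hpos L hL
    have hbridge : (PySem.Str.slice s (some i) (some (i + L))).toList
        = PySem.List.slice s.toList (some i) (some (i + L)) := by simp
    have hlist : (PySem.Str.slice s (some i) (some (i + L))).toList
        = (s.toList.drop i.toNat).take ((i + L).toNat - i.toNat) := by
      rw [hbridge]; exact PySem.List.slice_toNat _ h0 (by omega)
    rw [← hx, hlist]
    exact List.infix_iff_prefix_suffix.mpr
      ⟨s.toList.drop i.toNat, List.take_prefix _ _, List.drop_suffix _ _⟩
  · intro hinf
    rcases hinf with ⟨t, u, hdecomp⟩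
    refine ⟨PySem.Str.len k, hk, (t.length : Int), by positivity, ?_, ?_⟩
    · have hlen : s.toList.length = t.length + k.toList.length + u.length := by
        rw [← hdecomp]; simp only [List.length_append]
      simp only [PySem.Str.len_eq]
      omega
    · have h0 : (0 : Int) ≤ (t.length : Int) := by positivity
      apply String.toList_inj.mp
      have hbridge : (PySem.Str.slice s (some (t.length : Int))
          (some ((t.length : Int) + PySem.Str.len k))).toList
          = PySem.List.slice s.toList (some (t.length : Int))
              (some ((t.length : Int) + PySem.Str.len k)) := by simp
      have hslice : (PySem.Str.slice s (some (t.length : Int))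
          (some ((t.length : Int) + PySem.Str.len k))).toList
          = (s.toList.drop ((t.length : Int)).toNat).take
              (((t.length : Int) + PySem.Str.len k).toNat - ((t.length : Int)).toNat) := by
        rw [hbridge]
        exact PySem.List.slice_toNat _ h0 (by simp only [PySem.Str.len_eq]; positivity)
      rw [hslice]
      have htn : (((t.length : Int)).toNat) = t.length := by omega
      have hkn : (((t.length : Int) + PySem.Str.len k).toNat - ((t.length : Int)).toNat)
          = k.toList.length := by
        simp only [PySem.Str.len_eq]; omega
      rw [hkn, htn, ← hdecomp, List.append_assoc, List.drop_left, List.take_left]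

-- the inner index loop: one sentence appended once per distinct seen substring
theorem getD_foldl_modify_mem (subs : List String) (hnd : subs.Nodup)
    (d : PySem.Dict String (List String)) (s k : String) :
    (subs.foldl (fun idx sub => idx.modify sub [] (fun l => l ++ [s])) d).getD k []
      = d.getD k [] ++ (if k ∈ subs then [s] else []) := by
  induction subs generalizing d with
  | nil => simp
  | cons sub subs ih =>
    simp only [List.foldl_cons]
    rw [ih (List.nodup_cons.mp hnd).2]
    rw [PySem.Dict.getD_modify]
    by_cases hks : k = sub
    · subst hks
      have : k ∉ subs := (List.nodup_cons.mp hnd).1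
      simp [this]
    · simp [hks, List.mem_cons]

-- the outer index loop over the text
theorem getD_index (lengths : List Int) (text : List String)
    (d : PySem.Dict String (List String)) (k : String) :
    (text.foldl (fun idx s =>
        (bSeen lengths s).foldl (fun idx sub => idx.modify sub [] (fun l => l ++ [s])) idx) d).getD k []
      = d.getD k [] ++ text.filter (fun s => decide (k ∈ bSeen lengths s)) := by
  induction text generalizing d with
  | nil => simp
  | cons s text ih =>
    simp only [List.foldl_cons, List.filter_cons]
    rw [ih, getD_foldl_modify_mem _ (nodup_bSeen lengths s)]
    by_cases hm : k ∈ bSeen lengths s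
    · simp [hm]
    · simp [hm]

-- ===== VERDICT (by name: the statement is the Claim_ definition above) =====
theorem keyword_dic_spec : Claim_equal_keyword_dic := by
  intro keyword text _ hpre
  obtain ⟨hne, hnd⟩ := hpre
  cases keyword with
  | nil => exact absurd rfl hne
  | cons ks rest =>
    simp only [List.headI] at hnd
    unfold Spec_keyword_dic
    show keyword_dic (ks :: rest) text = keyword_dic_alt (ks :: rest) text
    simp only [keyword_dic, keyword_dic_alt]
    -- A's side: dict with keys ks, value text.filter (isIn k ·) at k
    rw [init_mkd ks hnd, A_outer ks hnd text ks (fun k hk => hk) hnd]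
    -- B's side
    set lengths := PySem.List.sorted (PySem.Set.ofList (ks.map PySem.Str.len)) (fun x => x) false with hlen
    have hpos : ∀ L ∈ lengths, 0 ≤ L := by
      intro L hL
      rw [hlen, PySem.List.mem_sorted, PySem.Set.mem_ofList] at hL
      rcases List.mem_map.mp hL with ⟨k, _, hk⟩
      rw [← hk]
      simp [PySem.Str.len_eq]
    have hmemlen : ∀ k ∈ ks, PySem.Str.len k ∈ lengths := by
      intro k hk
      rw [hlen, PySem.List.mem_sorted, PySem.Set.mem_ofList]
      exact List.mem_map.mpr ⟨k, hk, rfl⟩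
    set index := text.foldl (fun idx s =>
        (bSeen lengths s).foldl (fun idx sub => idx.modify sub [] (fun l => l ++ [s])) idx)
        (PySem.Dict.empty : PySem.Dict String (List String)) with hidx
    have hitems := PySem.Dict.items_foldl_insert_fresh (l := ks) (k := fun a => a)
        (v := fun k => index.getD k []) (d := (PySem.Dict.empty : PySem.Dict String (List String)))
        (by intro a _; exact PySem.Dict.contains_empty a)
        (by simpa using hnd)
    rw [hitems]
    have hmkd : (mkd ks (fun k => if k ∈ ks then [] ++ text.filter (fun s => PySem.Str.isIn k s) else [])).items
        = ks.map (fun k => (k, if k ∈ ks then [] ++ text.filter (fun s => PySem.Str.isIn k s) else [])) := rfl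
    rw [hmkd]
    have hempty : (PySem.Dict.empty : PySem.Dict String (List String)).items = [] := rfl
    rw [hempty, List.nil_append]
    apply List.map_congr_left
    intro k hk
    refine congrArg (Prod.mk k) ?_
    rw [hidx]
    beta_reduce
    rw [getD_index, PySem.Dict.getD_empty, List.nil_append, if_pos hk, List.nil_append]
    apply List.filter_congr
    intro s _
    by_cases hin : PySem.Str.isIn k s = true
    · rw [hin]
      exact (decide_eq_true ((mem_bSeen_iff_isIn lengths hpos s k (hmemlen k hk)).mpr hin)).symm
    · have hnot : k ∉ bSeen lengths s := fun hm =>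
        hin ((mem_bSeen_iff_isIn lengths hpos s k (hmemlen k hk)).mp hm)
      have hf : PySem.Str.isIn k s = false := by simpa using hin
      rw [hf]
      exact (decide_eq_false hnot).symm
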